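-- pv_equiv track=rewrite | github.com/vutrung203/BaiVS_code | Python/Bai21_tong_dandau.py | max_consecutive_sign
-- ===== SOURCE A (Python) =====
-- def max_consecutive_sign(nums):
--     if not nums:
--         return 0
--
--     max_count = 1  # Số lượng phần tử liên tiếp nhiều nhất
--     count = 1      # Số lượng phần tử liên tiếp hiện tại
--     for i in range(1, len(nums)):
--         # Nếu phần tử hiện tại có cùng dấu với phần tử trước đó
--         if (nums[i] >= 0 and nums[i-1] >= 0) or (nums[i] < 0 and nums[i-1] < 0):
--             count += 1
--             max_count = max(max_count, count)  # Cập nhật số lượng nhiều nhất nếu cần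
--         else:
--             count = 1  # Reset lại số lượng nếu dấu khác nhau
--
--     return max_count
-- ===== SOURCE B (Python) =====
-- def max_consecutive_sign(nums):
--     # Two-pointer run scan: find each maximal same-sign block and keep the longest.
--     best = 0
--     i = 0
--     n = len(nums)
--     while i < n:
--         j = i + 1
--         while j < n and (nums[j] >= 0) == (nums[i] >= 0):
--             j += 1
--         best = max(best, j - i)
--         i = j
--     return best
-- ===== Notes on version B (the rewrite author's own statement) =====
-- stated objective: alternative
-- what changed: Replaces A's running count+max state machine over index pairs (i-1,i) with a two-pointer scan that measures each maximal same-sign run directly and takes the maximum, with 0 as the natural default for the empty list.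
import Mathlib
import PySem

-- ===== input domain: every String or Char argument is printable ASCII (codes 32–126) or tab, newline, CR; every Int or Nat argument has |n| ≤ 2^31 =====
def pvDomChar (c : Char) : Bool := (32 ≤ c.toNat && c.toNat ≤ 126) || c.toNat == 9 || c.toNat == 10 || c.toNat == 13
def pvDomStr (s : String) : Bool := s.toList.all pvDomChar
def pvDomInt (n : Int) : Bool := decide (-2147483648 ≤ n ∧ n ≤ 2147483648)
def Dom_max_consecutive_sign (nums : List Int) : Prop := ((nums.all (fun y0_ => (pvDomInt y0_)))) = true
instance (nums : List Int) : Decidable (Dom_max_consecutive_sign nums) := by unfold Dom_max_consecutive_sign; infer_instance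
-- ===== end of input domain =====

-- B replaces A's running count+max state machine with a two-pointer scan over maximal
-- same-sign runs (an alternative decomposition; same O(n) cost).

-- ===== PORT A =====
def max_consecutive_sign (nums : List Int) : Int :=
  if nums = [] then 0
  else
    ((PySem.List.pyRange 1 (PySem.List.len nums) 1).foldl
      (fun (st : Int × Int) i =>
        let cur := PySem.List.pyGetD nums i 0
        let prev := PySem.List.pyGetD nums (i - 1) 0
        if (0 ≤ cur ∧ 0 ≤ prev) ∨ (cur < 0 ∧ prev < 0) then
          (max st.1 (st.2 + 1), st.2 + 1)
        else
          (st.1, 1))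
      (1, 1)).1

-- ===== PORT B =====
-- length of the inner while: how far the same-sign run of key k extends
def pvRunLen (k : Bool) : List Int → Nat
  | [] => 0
  | x :: xs => if decide (0 ≤ x) = k then pvRunLen k xs + 1 else 0

-- outer while: advance past the run starting at the head, keep the best length
def pvAltGo : List Int → Int → Int
  | [], best => best
  | x :: xs, best =>
      let r := pvRunLen (decide (0 ≤ x)) xs
      pvAltGo (xs.drop r) (max best ((r : Int) + 1))
  termination_by l _ => l.length
  decreasing_by
    simp only [List.length_drop, List.length_cons]
    omega

def max_consecutive_sign_alt (nums : List Int) : Int := pvAltGo nums 0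

-- ===== PRECONDITION & SPEC =====
def Spec_max_consecutive_sign (nums : List Int) (out : Int) : Prop := out = max_consecutive_sign_alt nums
instance (nums : List Int) (out : Int) : Decidable (Spec_max_consecutive_sign nums out) := by unfold Spec_max_consecutive_sign; infer_instance

-- ===== CLAIM (what is proved, stated in full; the proofs are below) =====
def Claim_equal_max_consecutive_sign : Prop := ∀ (nums : List Int), Dom_max_consecutive_sign nums → Spec_max_consecutive_sign nums (max_consecutive_sign nums)

-- ===== LEMMAS AND PROOFS =====

-- reference function: best run length when a run of key k with current length c is open
def pvBestExt (k : Bool) (c : Int) : List Int → Int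
  | [] => c
  | x :: xs =>
      if decide (0 ≤ x) = k then pvBestExt k (c + 1) xs
      else max c (pvBestExt (decide (0 ≤ x)) 1 xs)

lemma pvBestExt_ge (k : Bool) (c : Int) (xs : List Int) : c ≤ pvBestExt k c xs := by
  induction xs generalizing k c with
  | nil => simp [pvBestExt]
  | cons x xs ih =>
      simp only [pvBestExt]
      split
      · exact le_trans (by omega) (ih _ (c + 1))
      · exact le_max_left _ _

-- B computes pvBestExt
lemma pvAltGo_eq_bestExt_aux : ∀ (n : Nat) (xs : List Int), xs.length ≤ n → ∀ (k : Bool) (c best : Int), 1 ≤ c →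
    pvAltGo (xs.drop (pvRunLen k xs)) (max best (c + (pvRunLen k xs : Int))) =
      max best (pvBestExt k c xs) := by
  intro n
  induction n with
  | zero =>
    intro xs hlen k c best hc
    match xs, hlen with
    | [], _ => simp [pvRunLen, pvBestExt, pvAltGo]
  | succ n ih =>
    intro xs hlen k c best hc
    match xs with
    | [] => simp [pvRunLen, pvBestExt, pvAltGo]
    | x :: xs =>
      have hxs : xs.length ≤ n := by simp at hlen; omega
      by_cases hk : decide (0 ≤ x) = k
      · have hrun : pvRunLen k (x :: xs) = pvRunLen k xs + 1 := by
          simp [pvRunLen, hk]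
        rw [hrun]
        have hdrop : (x :: xs).drop (pvRunLen k xs + 1) = xs.drop (pvRunLen k xs) := rfl
        rw [hdrop]
        have harith : c + ((pvRunLen k xs + 1 : Nat) : Int) = (c + 1) + (pvRunLen k xs : Int) := by
          push_cast; ring
        rw [harith]
        rw [ih xs hxs k (c + 1) best (by omega)]
        simp [pvBestExt, hk]
      · have hrun : pvRunLen k (x :: xs) = 0 := by simp [pvRunLen, hk]
        rw [hrun]
        simp only [List.drop_zero, Nat.cast_zero, add_zero]
        show pvAltGo (x :: xs) (max best c) = max best (pvBestExt k c (x :: xs))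
        rw [pvAltGo]
        have harith : ((pvRunLen (decide (0 ≤ x)) xs : Nat) : Int) + 1
            = 1 + (pvRunLen (decide (0 ≤ x)) xs : Int) := by ring
        rw [harith]
        rw [ih xs hxs (decide (0 ≤ x)) 1 (max best c) (by omega)]
        simp only [pvBestExt, hk, if_false]
        rw [max_assoc]

-- A's loop body as a structural recursion carrying the sign key of the previous element
def pvGoA (k : Bool) : List Int → Int × Int → Int × Int
  | [], st => st
  | x :: xs, st =>
      if decide (0 ≤ x) = k then pvGoA (decide (0 ≤ x)) xs (max st.1 (st.2 + 1), st.2 + 1)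
      else pvGoA (decide (0 ≤ x)) xs (st.1, 1)

lemma pvAltGo_eq_bestExt (xs : List Int) (k : Bool) (c best : Int) (hc : 1 ≤ c) :
    pvAltGo (xs.drop (pvRunLen k xs)) (max best (c + (pvRunLen k xs : Int))) =
      max best (pvBestExt k c xs) :=
  pvAltGo_eq_bestExt_aux xs.length xs (le_refl _) k c best hc

-- A's state machine also computes pvBestExt
lemma pvGoA_eq_bestExt (xs : List Int) : ∀ (k : Bool) (m c : Int), 1 ≤ c → c ≤ m →
    (pvGoA k xs (m, c)).1 = max m (pvBestExt k c xs) := by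
  induction xs with
  | nil =>
      intro k m c hc hcm
      simp only [pvGoA, pvBestExt]
      omega
  | cons x xs ih =>
      intro k m c hc hcm
      by_cases hk : decide (0 ≤ x) = k
      · simp only [pvGoA, hk, if_true, pvBestExt]
        rw [ih k (max m (c + 1)) (c + 1) (by omega) (by omega)]
        have h1 := pvBestExt_ge k (c + 1) xs
        omega
      · simp only [pvGoA, hk, if_false, pvBestExt]
        rw [ih (decide (0 ≤ x)) m 1 (by omega) (by omega)]
        have h1 := pvBestExt_ge (decide (0 ≤ x)) 1 xs
        omega

-- the index loop of A is pvGoA over the suffix, with the previous element's sign as key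
lemma pvFoldl_eq_goA (L : List Int) : ∀ (tl : List Int) (j : Nat) (prev : Int) (st : Int × Int),
    1 ≤ j → L.drop j = tl → PySem.List.pyGetD L ((j : Int) - 1) 0 = prev →
    ((PySem.List.pyRange j (PySem.List.len L) 1).foldl
      (fun (st : Int × Int) i =>
        let cur := PySem.List.pyGetD L i 0
        let prev := PySem.List.pyGetD L (i - 1) 0
        if (0 ≤ cur ∧ 0 ≤ prev) ∨ (cur < 0 ∧ prev < 0) then
          (max st.1 (st.2 + 1), st.2 + 1)
        else
          (st.1, 1)) st)
    = pvGoA (decide (0 ≤ prev)) tl st := by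
  intro tl
  induction tl generalizing L with
  | nil =>
      intro j prev st hj hdrop hprev
      have hlen : L.length ≤ j := by
        have := List.drop_eq_nil_iff.mp hdrop
        omega
      rw [PySem.List.pyRange_one_eq_nil (by simp [PySem.List.len]; omega)]
      simp [pvGoA]
  | cons x tl ih =>
      intro j prev st hj hdrop hprev
      have hjlt : j < L.length := by
        by_contra h
        rw [List.drop_eq_nil_iff.mpr (by omega)] at hdrop
        simp at hdrop
      have hx : L[j]? = some x := by
        have : (L.drop j)[0]? = some x := by rw [hdrop]; rfl
        simpa [List.getElem?_drop] using this
      have hcur : PySem.List.pyGetD L (j : Int) 0 = x := by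
        rw [PySem.List.pyGetD_natCast]
        simp [List.getD, hx]
      rw [PySem.List.pyRange_one_cons (by simp [PySem.List.len]; omega)]
      rw [List.foldl_cons]
      have hdrop' : L.drop (j + 1) = tl := by
        have : L.drop (j + 1) = (L.drop j).drop 1 := by
          rw [List.drop_drop]
        rw [this, hdrop]; rfl
      have hprev' : PySem.List.pyGetD L (((j + 1 : Nat) : Int) - 1) 0 = x := by
        have : ((j + 1 : Nat) : Int) - 1 = (j : Int) := by push_cast; ring
        rw [this, hcur]
      have hih : ∀ st' : Int × Int,
          ((PySem.List.pyRange ((j : Int) + 1) (PySem.List.len L) 1).foldl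
            (fun (st : Int × Int) i =>
              let cur := PySem.List.pyGetD L i 0
              let prev := PySem.List.pyGetD L (i - 1) 0
              if (0 ≤ cur ∧ 0 ≤ prev) ∨ (cur < 0 ∧ prev < 0) then
                (max st.1 (st.2 + 1), st.2 + 1)
              else
                (st.1, 1)) st')
          = pvGoA (decide (0 ≤ x)) tl st' := by
        intro st'
        have h := ih L (j + 1) x st' (by omega) hdrop' hprev'
        push_cast at h
        exact h
      push_cast
      rw [hih]
      simp only [hcur, hprev]
      by_cases h1 : 0 ≤ x <;> by_cases h2 : 0 ≤ prev
      · have hc : ((0 ≤ x ∧ 0 ≤ prev) ∨ (x < 0 ∧ prev < 0)) := Or.inl ⟨h1, h2⟩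
        have hk : decide (0 ≤ x) = decide (0 ≤ prev) := by simp [h1, h2]
        simp only [if_pos hc, pvGoA, if_pos hk]
      · have hc : ¬ ((0 ≤ x ∧ 0 ≤ prev) ∨ (x < 0 ∧ prev < 0)) := by
          push Not; constructor <;> intro h <;> omega
        have hk : ¬ decide (0 ≤ x) = decide (0 ≤ prev) := by simp [h1, h2]
        simp only [if_neg hc, pvGoA, if_neg hk]
      · have hc : ¬ ((0 ≤ x ∧ 0 ≤ prev) ∨ (x < 0 ∧ prev < 0)) := by
          push Not; constructor <;> intro h <;> omega
        have hk : ¬ decide (0 ≤ x) = decide (0 ≤ prev) := by simp [h1, h2]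
        simp only [if_neg hc, pvGoA, if_neg hk]
      · have hc : ((0 ≤ x ∧ 0 ≤ prev) ∨ (x < 0 ∧ prev < 0)) := Or.inr ⟨by omega, by omega⟩
        have hk : decide (0 ≤ x) = decide (0 ≤ prev) := by simp [h1, h2]
        simp only [if_pos hc, pvGoA, if_pos hk]

-- ===== VERDICT (by name: the statement is the Claim_ definition above) =====
theorem max_consecutive_sign_spec : Claim_equal_max_consecutive_sign := by
  intro nums _
  unfold Spec_max_consecutive_sign max_consecutive_sign max_consecutive_sign_alt
  match nums with
  | [] => simp [pvAltGo]
  | x :: xs =>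
    simp only [if_neg (List.cons_ne_nil x xs)]
    have hprev : PySem.List.pyGetD (x :: xs) (((1 : Nat) : Int) - 1) 0 = x := by
      norm_num [PySem.List.pyGetD_zero_cons]
    have h1 := pvFoldl_eq_goA (x :: xs) xs 1 x (1, 1) (by omega) rfl hprev
    push_cast at h1
    rw [h1]
    rw [pvGoA_eq_bestExt xs (decide (0 ≤ x)) 1 1 (by omega) (by omega)]
    -- B side
    rw [pvAltGo]
    have harith : ((pvRunLen (decide (0 ≤ x)) xs : Nat) : Int) + 1
        = 1 + (pvRunLen (decide (0 ≤ x)) xs : Int) := by ring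
    rw [harith]
    rw [pvAltGo_eq_bestExt xs (decide (0 ≤ x)) 1 0 (by omega)]
    have := pvBestExt_ge (decide (0 ≤ x)) 1 xs
    omega
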